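-- pv_equiv track=rewrite | github.com/UserAK04/Python-DSA | Strings/BalancedString.py | solve
-- ===== SOURCE A (Python) =====
-- num = "1234"
--
-- def solve(num):
--
--     evenSum = 0
--     oddSum = 0
--
--     for i in range(len(num)):
--         if i % 2 == 0:
--             evenSum += int(num[i])
--         else:
--             oddSum += int(num[i])
--
--     return evenSum == oddSum
-- ===== SOURCE B (Python) =====
-- def solve(num):
--     def diff(s):
--         if not s:
--             return 0
--         if len(s) == 1:
--             return int(s[0])
--         return int(s[0]) - int(s[1]) + diff(s[2:])
--     return diff(num) == 0
-- ===== Notes on version B (the rewrite author's own statement) =====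
-- stated objective: alternative
-- what changed: Replaces the indexed loop with a parity test and two accumulators by a direct recursion that consumes the string two characters at a time, accumulating the signed difference int(s[0]) - int(s[1]) per pair (no index, no parity check), and returns whether that difference is 0.
import Mathlib
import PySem

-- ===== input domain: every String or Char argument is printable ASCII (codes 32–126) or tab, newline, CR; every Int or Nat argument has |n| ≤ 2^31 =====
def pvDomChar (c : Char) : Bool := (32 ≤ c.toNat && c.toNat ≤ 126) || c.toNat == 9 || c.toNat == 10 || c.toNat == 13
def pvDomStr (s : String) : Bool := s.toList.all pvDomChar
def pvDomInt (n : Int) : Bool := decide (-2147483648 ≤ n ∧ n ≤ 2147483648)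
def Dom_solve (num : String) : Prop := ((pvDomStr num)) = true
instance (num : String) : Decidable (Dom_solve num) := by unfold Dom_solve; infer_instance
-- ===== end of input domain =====

-- B replaces A's indexed loop with two accumulators and a parity test by a recursion
-- consuming the string two characters at a time, accumulating the signed per-pair
-- difference and comparing it to 0 (an alternative decomposition, same cost).


-- ===== PORT A =====
-- int(num[i]) for a single character c is PySem.Int.ofChars? [c]; under Pre_solve (all
-- characters are digits) it always returns some, so the .getD 0 totalisation is never hit.
def solve (num : String) : Bool :=
  let cs := num.toList
  let s := (PySem.List.pyRange 0 (PySem.Str.len num) 1).foldl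
    (fun (p : Int × Int) i =>
      if PySem.Int.mod i 2 == 0 then
        (p.1 + (PySem.Int.ofChars? [PySem.List.pyGetD cs i ' ']).getD 0, p.2)
      else
        (p.1, p.2 + (PySem.Int.ofChars? [PySem.List.pyGetD cs i ' ']).getD 0))
    (0, 0)
  s.1 == s.2

-- ===== PORT B =====
-- diff(s): empty → 0; one char → int(s[0]); else int(s[0]) - int(s[1]) + diff(s[2:]).
def pvDiff (s : List Char) : Int :=
  match s with
  | [] => 0
  | [c] => (PySem.Int.ofChars? [c]).getD 0
  | c1 :: c2 :: rest =>
      (PySem.Int.ofChars? [c1]).getD 0 - (PySem.Int.ofChars? [c2]).getD 0 + pvDiff rest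

def solve_alt (num : String) : Bool := pvDiff num.toList == 0

-- ===== PRECONDITION & SPEC =====
-- Pre_ excludes exactly the inputs on which A raises ValueError: any character that is
-- not an ASCII digit makes int(num[i]) raise.
def Pre_solve (num : String) : Prop := num.toList.all PySem.Chars.isdigit = true
instance (num : String) : Decidable (Pre_solve num) := by unfold Pre_solve; infer_instance
def pvWitness_solve : String := "1234"

def Spec_solve (num : String) (out : Bool) : Prop := out = solve_alt num
instance (num : String) (out : Bool) : Decidable (Spec_solve num out) := by unfold Spec_solve; infer_instance

-- ===== CLAIM (what is proved, stated in full; the proofs are below) =====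
def Claim_equal_solve : Prop := ∀ (num : String), Dom_solve num → Pre_solve num → Spec_solve num (solve num)

-- ===== LEMMAS AND PROOFS =====

-- A's pair-fold, with a signed reading: final evenSum - oddSum equals the fold of the
-- signed step over the same index list.
theorem pv_loop_inv (g : Int → Int) (l : List Int) : ∀ (e o : Int),
    l.foldl (fun (t : Int) i => t + (if PySem.Int.mod i 2 == 0 then g i else -(g i))) (e - o)
      = (l.foldl (fun (p : Int × Int) i =>
          if PySem.Int.mod i 2 == 0 then (p.1 + g i, p.2) else (p.1, p.2 + g i)) (e, o)).1
        - (l.foldl (fun (p : Int × Int) i =>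
          if PySem.Int.mod i 2 == 0 then (p.1 + g i, p.2) else (p.1, p.2 + g i)) (e, o)).2 := by
  induction l with
  | nil => intro e o; simp
  | cons x xs ih =>
    intro e o
    simp only [List.foldl_cons]
    by_cases h : PySem.Int.mod x 2 == 0
    · rw [if_pos h, if_pos h, show e - o + g x = (e + g x) - o from by ring]
      exact ih (e + g x) o
    · rw [if_neg h, if_neg h, show e - o + -(g x) = e - (o + g x) from by ring]
      exact ih e (o + g x)

-- The signed fold over enumerate equals B's two-at-a-time recursion, for any even start.
theorem pv_signed_eq_diff (cs : List Char) : ∀ (s t : Int), s % 2 = 0 →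
    (PySem.List.enumerate cs s).foldl
      (fun (u : Int) (p : Int × Char) =>
        u + (if PySem.Int.mod p.1 2 == 0 then (PySem.Int.ofChars? [p.2]).getD 0
             else -((PySem.Int.ofChars? [p.2]).getD 0))) t
      = t + pvDiff cs := by
  induction cs using pvDiff.induct with
  | case1 => intro s t _; simp [PySem.List.enumerate_nil, pvDiff]
  | case2 c =>
    intro s t hs
    simp [PySem.List.enumerate_cons, PySem.List.enumerate_nil, pvDiff, hs]
  | case3 c1 c2 rest ih =>
    intro s t hs
    have h1 : (s + 1) % 2 ≠ 0 := by omega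
    have h2 : (s + 1 + 1) % 2 = 0 := by omega
    simp only [PySem.List.enumerate_cons, List.foldl_cons]
    rw [if_pos (by simp [hs]), if_neg (by simp; omega), ih (s + 1 + 1) _ h2]
    conv_rhs => rw [pvDiff]
    ring

theorem pv_beq_sub (a b : Int) : (a == b) = (a - b == 0) := by
  by_cases h : a = b
  · simp [h]
  · simp [h]
    omega

theorem solve_eq_alt (num : String) : solve num = solve_alt num := by
  unfold solve solve_alt
  rw [PySem.Str.len_eq]
  have hlen : PySem.List.len num.toList = (num.toList.length : Int) := by
    simp [PySem.List.len]
  set g : Int → Int := fun i => (PySem.Int.ofChars? [PySem.List.pyGetD num.toList i ' ']).getD 0 with hg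
  simp only []
  rw [pv_beq_sub]
  have hinv := pv_loop_inv g (PySem.List.pyRange 0 (num.toList.length : Int) 1) 0 0
  rw [show ((0:Int) - 0) = (0:Int) from by ring] at hinv
  rw [← hinv]
  have henum := pv_signed_eq_diff num.toList 0 0 (by norm_num)
  rw [PySem.List.enumerate_eq_map_pyRange num.toList ' ', List.foldl_map, hlen] at henum
  simp only [hg]
  rw [henum]
  ring_nf

-- ===== VERDICT (by name: the statement is the Claim_ definition above) =====
theorem solve_spec : Claim_equal_solve := by
  intro num _ _
  unfold Spec_solve
  exact solve_eq_alt num
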